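-- pv_equiv track=rewrite | github.com/A-rgonaut/LM-32_HrR_Hotel-receptionist_Robot | src/simulation/ros2_ws/build/progetto/build/lib/progetto/interagisci_scenario_a.py | rileva_lingua
-- ===== SOURCE A (Python) =====
-- def rileva_lingua(testo):
--     dizionario = {
--         'IT': {'ciao', 'buongiorno', 'salve', 'buonasera', 'sono', 'chiamo'},
--         'EN': {'hi', 'hello', 'hey', 'good morning', 'am', 'name'},
--     }
--     parole = set(testo.lower().split())
--     for lang, parola in dizionario.items():
--         if parole.intersection(parola):
--             return lang
--     return None
-- ===== SOURCE B (Python) =====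
-- RANK = {'ciao': 0, 'buongiorno': 0, 'salve': 0, 'buonasera': 0, 'sono': 0, 'chiamo': 0,
--         'hi': 1, 'hello': 1, 'hey': 1, 'good morning': 1, 'am': 1, 'name': 1}
--
--
-- def rileva_lingua(testo):
--     best = 2
--     for parola in testo.lower().split():
--         r = RANK.get(parola, 2)
--         if r < best:
--             best = r
--             if best == 0:
--                 break
--     return ('IT', 'EN', None)[best]
-- ===== Notes on version B (the rewrite author's own statement) =====
-- stated objective: alternative
-- what changed: Replaces the word-set construction and per-language set intersections with a single merged word-to-rank lookup table and a running-minimum of ranks (with early exit once the top rank is found), decoded into the language label at the end.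
import Mathlib
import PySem

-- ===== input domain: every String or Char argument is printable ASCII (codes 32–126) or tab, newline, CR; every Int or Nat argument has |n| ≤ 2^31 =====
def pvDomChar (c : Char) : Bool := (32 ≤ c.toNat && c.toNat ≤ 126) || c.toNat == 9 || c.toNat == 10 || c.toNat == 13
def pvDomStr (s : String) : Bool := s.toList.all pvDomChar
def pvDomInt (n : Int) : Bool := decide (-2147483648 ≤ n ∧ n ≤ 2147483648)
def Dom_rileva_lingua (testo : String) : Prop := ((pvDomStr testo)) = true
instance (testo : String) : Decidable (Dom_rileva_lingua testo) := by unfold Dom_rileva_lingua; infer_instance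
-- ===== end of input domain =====

-- B replaces the word-set + per-language set-intersection scan with a single merged
-- word-to-rank lookup table and a running-minimum with early exit (objective: alternative);
-- exact equivalence is proved.


-- ===== PORT A =====
-- the literal dict of A, in insertion order
def pvDizionario : List (String × PySem.Set String) :=
  [("IT", PySem.Set.ofList ["ciao", "buongiorno", "salve", "buonasera", "sono", "chiamo"]),
   ("EN", PySem.Set.ofList ["hi", "hello", "hey", "good morning", "am", "name"])]

-- 'for lang, parola in dizionario.items(): if parole.intersection(parola): return lang'
def pvLoopA (parole : PySem.Set String) : List (String × PySem.Set String) → Option String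
  | [] => none
  | (lang, kws) :: rest =>
      if PySem.Set.inter parole kws ≠ [] then some lang else pvLoopA parole rest

def rileva_lingua (testo : String) : Option String :=
  pvLoopA (PySem.Set.ofList (PySem.Str.split₀ (PySem.Str.lower testo))) pvDizionario

-- ===== PORT B =====
-- the literal RANK dict of Source B, in insertion order
def pvRank : PySem.Dict String Int :=
  PySem.Dict.ofList [("ciao", 0), ("buongiorno", 0), ("salve", 0), ("buonasera", 0),
    ("sono", 0), ("chiamo", 0), ("hi", 1), ("hello", 1), ("hey", 1),
    ("good morning", 1), ("am", 1), ("name", 1)]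

-- 'for parola in …: r = RANK.get(parola, 2); if r < best: best = r; if best == 0: break'
def pvLoopB : List String → Int → Int
  | [], best => best
  | w :: rest, best =>
      let r := PySem.Dict.getD pvRank w 2
      if r < best then
        if r == 0 then r else pvLoopB rest r
      else pvLoopB rest best

def rileva_lingua_alt (testo : String) : Option String :=
  let best := pvLoopB (PySem.Str.split₀ (PySem.Str.lower testo)) 2
  -- ('IT', 'EN', None)[best]
  if best = 0 then some "IT" else if best = 1 then some "EN" else none

-- ===== PRECONDITION & SPEC =====
def Spec_rileva_lingua (testo : String) (out : Option String) : Prop := out = rileva_lingua_alt testo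
instance (testo : String) (out : Option String) : Decidable (Spec_rileva_lingua testo out) := by unfold Spec_rileva_lingua; infer_instance

-- ===== CLAIM =====
def Claim_equal_rileva_lingua : Prop := ∀ (testo : String), Dom_rileva_lingua testo → Spec_rileva_lingua testo (rileva_lingua testo)

-- ===== LEMMAS AND PROOFS =====

-- the two keyword sets of A, named for the proofs
def pvItKw : PySem.Set String :=
  PySem.Set.ofList ["ciao", "buongiorno", "salve", "buonasera", "sono", "chiamo"]
def pvEnKw : PySem.Set String :=
  PySem.Set.ofList ["hi", "hello", "hey", "good morning", "am", "name"]

-- B's table lookup, characterised by membership in A's two keyword sets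
set_option maxHeartbeats 1000000 in
theorem pvRankSpec (w : String) : PySem.Dict.getD pvRank w 2 =
    (if PySem.Set.contains pvItKw w then 0 else if PySem.Set.contains pvEnKw w then 1 else 2) := by
  have hch : pvRank = (((((((((((PySem.Dict.empty.insert "ciao" (0 : Int)).insert "buongiorno" 0).insert
      "salve" 0).insert "buonasera" 0).insert "sono" 0).insert "chiamo" 0).insert "hi" 1).insert
      "hello" 1).insert "hey" 1).insert "good morning" 1).insert "am" 1).insert "name" 1 := by decide
  rw [hch]
  simp only [PySem.Dict.getD_insert, PySem.Dict.getD_empty]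
  simp [pvItKw, pvEnKw, PySem.Set.ofList, PySem.Set.add, PySem.Set.contains]
  split_ifs <;> simp_all

-- B's running-minimum loop computes the least rank present (3 = neither)
theorem pvLoopB_char (ws : List String) (best : Int) (hb : best = 1 ∨ best = 2) :
    pvLoopB ws best = min best
      (if ws.any (PySem.Set.contains pvItKw) then 0
       else if ws.any (PySem.Set.contains pvEnKw) then 1 else 2) := by
  induction ws generalizing best with
  | nil => rcases hb with rfl | rfl <;> simp [pvLoopB]
  | cons w ws ih =>
      simp only [pvLoopB, pvRankSpec w, List.any_cons]
      by_cases hit : w ∈ pvItKw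
      · rcases hb with rfl | rfl <;> simp [hit]
      · by_cases hen : w ∈ pvEnKw
        · rcases hb with rfl | rfl <;>
            simp [hit, hen, ih 1 (Or.inl rfl)] <;> split_ifs <;> simp_all
        · rcases hb with rfl | rfl <;>
            simp [hit, hen, ih 1 (Or.inl rfl), ih 2 (Or.inr rfl)]

-- A's intersection test is the same 'any' flag
theorem pvInterNe (ws : List String) (kw : PySem.Set String) :
    (PySem.Set.inter (PySem.Set.ofList ws) kw ≠ []) ↔ ws.any (PySem.Set.contains kw) = true := by
  rw [← List.isEmpty_eq_false_iff, List.isEmpty_eq_false_iff_exists_mem]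
  constructor
  · rintro ⟨y, hy⟩
    rw [PySem.Set.mem_inter _ _ _] at hy
    simp only [List.any_eq_true]
    exact ⟨y, (PySem.Set.mem_ofList _ _).1 hy.1, (PySem.Set.contains_iff _ _).2 hy.2⟩
  · intro h
    simp only [List.any_eq_true] at h
    obtain ⟨y, hy, hk⟩ := h
    exact ⟨y, (PySem.Set.mem_inter _ _ _).2 ⟨(PySem.Set.mem_ofList _ _).2 hy, (PySem.Set.contains_iff _ _).1 hk⟩⟩

-- ===== VERDICT =====
theorem rileva_lingua_spec : Claim_equal_rileva_lingua := by
  intro testo _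
  unfold Spec_rileva_lingua rileva_lingua rileva_lingua_alt
  have hdz : pvDizionario = [("IT", pvItKw), ("EN", pvEnKw)] := rfl
  rw [hdz]
  set ws := PySem.Str.split₀ (PySem.Str.lower testo) with hws
  rw [pvLoopB_char ws 2 (Or.inr rfl)]
  simp only [pvLoopA]
  by_cases hit : ws.any (PySem.Set.contains pvItKw) = true
  · rw [if_pos ((pvInterNe ws pvItKw).2 hit)]
    simp [hit]
  · rw [if_neg (fun h => hit ((pvInterNe ws pvItKw).1 h))]
    by_cases hen : ws.any (PySem.Set.contains pvEnKw) = true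
    · rw [if_pos ((pvInterNe ws pvEnKw).2 hen)]
      simp [hit, hen]
    · rw [if_neg (fun h => hen ((pvInterNe ws pvEnKw).1 h))]
      simp [hit, hen]
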